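-- pv_equiv track=rewrite | github.com/ShineySun/2019_ICPC_PRAC | 2021_Algorithm_HCI/practice_test.py | solution
-- ===== SOURCE A (Python) =====
-- def solution(answers):
--     p_1 = [1,2,3,4,5]
--     p_2 = [2,1,2,3,2,4,2,5]
--     p_3 = [3,3,1,1,2,2,4,4,5,5]
--
--     sol = [0,0,0]
--
--     for i in range(len(answers)):
--         if p_1[i%len(p_1)] == answers[i]:
--             sol[0] += 1
--         if p_2[i%len(p_2)] == answers[i]:
--             sol[1] += 1
--         if p_3[i%len(p_3)] == answers[i]:
--             sol[2] += 1
--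
--     max_num = max(sol)
--
--     answer = [i+1 for i, value in enumerate(sol) if value == max_num]
--
--     return answer
-- ===== SOURCE B (Python) =====
-- def solution(answers):
--     patterns = [[1, 2, 3, 4, 5], [2, 1, 2, 3, 2, 4, 2, 5], [3, 3, 1, 1, 2, 2, 4, 4, 5, 5]]
--     PERIOD = 40  # lcm of the pattern lengths: position i behaves like i % 40 for all three
--     cnt = {}
--     for i, a in enumerate(answers):
--         key = (i % PERIOD, a)
--         cnt[key] = cnt.get(key, 0) + 1
--     sol = [sum(cnt.get((r, p[r % len(p)]), 0) for r in range(PERIOD)) for p in patterns]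
--     best = max(sol)
--     return [k + 1 for k, v in enumerate(sol) if v == best]
-- ===== Notes on version B (the rewrite author's own statement) =====
-- stated objective: alternative
-- what changed: Instead of comparing every answer against the three patterns, B aggregates the answers once into a dict keyed by (position mod 40, value) -- 40 being the lcm of the pattern lengths -- and then computes each pattern's score as a sum of 40 dictionary lookups, with no per-element pattern comparison at all; max and tie handling unchanged.
import Mathlib
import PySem

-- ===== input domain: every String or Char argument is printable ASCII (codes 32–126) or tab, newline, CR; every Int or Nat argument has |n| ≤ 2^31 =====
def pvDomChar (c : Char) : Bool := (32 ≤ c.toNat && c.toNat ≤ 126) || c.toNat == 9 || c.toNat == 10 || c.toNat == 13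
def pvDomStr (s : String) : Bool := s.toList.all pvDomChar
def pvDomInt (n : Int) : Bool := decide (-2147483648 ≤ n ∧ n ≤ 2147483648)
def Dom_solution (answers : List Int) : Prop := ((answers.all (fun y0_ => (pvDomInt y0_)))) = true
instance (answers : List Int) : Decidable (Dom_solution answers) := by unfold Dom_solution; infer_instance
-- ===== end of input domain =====

-- B replaces A's per-element comparison against the three patterns by a single aggregation
-- of the answers into a dict keyed by (position mod 40, value) — 40 = lcm of the pattern
-- lengths — after which each pattern's score is a sum of 40 dict lookups; objective: alternative.

-- ===== PORT A =====
-- literal port: one loop over range(len(answers)) updating the triple sol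
def solution (answers : List Int) : List Int :=
  let p1 : List Int := [1, 2, 3, 4, 5]
  let p2 : List Int := [2, 1, 2, 3, 2, 4, 2, 5]
  let p3 : List Int := [3, 3, 1, 1, 2, 2, 4, 4, 5, 5]
  let sol : Int × Int × Int :=
    (PySem.List.pyRange 0 (answers.length : Int) 1).foldl
      (fun s i =>
        ((if PySem.List.pyGetD p1 (PySem.Int.mod i (p1.length : Int)) 0
              = PySem.List.pyGetD answers i 0 then s.1 + 1 else s.1),
         (if PySem.List.pyGetD p2 (PySem.Int.mod i (p2.length : Int)) 0
              = PySem.List.pyGetD answers i 0 then s.2.1 + 1 else s.2.1),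
         (if PySem.List.pyGetD p3 (PySem.Int.mod i (p3.length : Int)) 0
              = PySem.List.pyGetD answers i 0 then s.2.2 + 1 else s.2.2)))
      (0, 0, 0)
  let maxNum := max (max sol.1 sol.2.1) sol.2.2
  ((PySem.List.enumerate [sol.1, sol.2.1, sol.2.2] 0).filter
      (fun p => decide (p.2 = maxNum))).map (fun p => p.1 + 1)

-- ===== PORT B =====
-- the aggregation dict: cnt[(i % 40, a)] += 1 over enumerate(answers)
def pvCnt (answers : List Int) : PySem.Dict (Int × Int) Int :=
  (PySem.List.enumerate answers 0).foldl
    (fun d ia => d.insert (PySem.Int.mod ia.1 40, ia.2)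
                   (d.getD (PySem.Int.mod ia.1 40, ia.2) 0 + 1))
    PySem.Dict.empty

-- sum(cnt.get((r, p[r % len(p)]), 0) for r in range(40))
def pvScore (cnt : PySem.Dict (Int × Int) Int) (p : List Int) : Int :=
  (PySem.List.pyRange 0 40 1).foldl
    (fun acc r =>
      acc + cnt.getD (r, PySem.List.pyGetD p (PySem.Int.mod r (p.length : Int)) 0) 0) 0

def solution_alt (answers : List Int) : List Int :=
  let patterns : List (List Int) :=
    [[1, 2, 3, 4, 5], [2, 1, 2, 3, 2, 4, 2, 5], [3, 3, 1, 1, 2, 2, 4, 4, 5, 5]]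
  let cnt := pvCnt answers
  let sol := patterns.map (fun p => pvScore cnt p)
  let best := (PySem.List.max? sol (fun x => x)).getD 0
  ((PySem.List.enumerate sol 0).filter (fun q => decide (q.2 = best))).map
    (fun q => q.1 + 1)

-- ===== PRECONDITION & SPEC =====
def Spec_solution (answers : List Int) (out : List Int) : Prop := out = solution_alt answers
instance (answers : List Int) (out : List Int) : Decidable (Spec_solution answers out) := by unfold Spec_solution; infer_instance

-- ===== CLAIM =====
def Claim_equal_solution : Prop := ∀ (answers : List Int), Dom_solution answers → Spec_solution answers (solution answers)

-- ===== LEMMAS AND PROOFS =====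


theorem pv_mod_mod (m : Int) (hm : 0 < m) (hd : m ∣ 40) (a : Int) :
    PySem.Int.mod (PySem.Int.mod a 40) m = PySem.Int.mod a m := by
  unfold PySem.Int.mod
  have h40 : Int.fmod a 40 = a % 40 := by rw [Int.fmod_eq_emod]; simp
  have hme : ∀ x : Int, Int.fmod x m = x % m := by
    intro x; rw [Int.fmod_eq_emod]; simp [hm.le]
  rw [h40, hme, hme, Int.emod_emod_of_dvd _ hd]

theorem pv_mod40_bounds (i : Int) : 0 ≤ PySem.Int.mod i 40 ∧ PySem.Int.mod i 40 < 40 := by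
  unfold PySem.Int.mod
  have h40 : Int.fmod i 40 = i % 40 := by rw [Int.fmod_eq_emod]; simp
  rw [h40]
  exact ⟨Int.emod_nonneg _ (by norm_num), Int.emod_lt_of_pos _ (by norm_num)⟩

theorem pv_foldl_add {α : Type} (f : α → Int) : ∀ (l : List α) (a : Int),
    l.foldl (fun acc x => acc + f x) a = a + (l.map f).sum := by
  intro l
  induction l with
  | nil => intro a; simp
  | cons x t ih => intro a; simp [List.foldl, ih]; ring

theorem pv_sum_zero (e : Int → Int) (x : Int × Int) :
    ∀ (L : List Int), (∀ r ∈ L, r ≠ x.1) →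
      (L.map (fun r => if (r, e r) = x then (1:Int) else 0)).sum = 0 := by
  intro L
  induction L with
  | nil => intro _; simp
  | cons r t ih =>
    intro h
    have hr : r ≠ x.1 := h r (by simp)
    have hc : ¬((r, e r) = x) := fun hc => hr (by rw [← hc])
    simp [hc, ih (fun s hs => h s (by simp [hs]))]

theorem pv_sum_ind (e : Int → Int) (x : Int × Int) (h0 : 0 ≤ x.1) (h40 : x.1 < 40) :
    ((PySem.List.pyRange 0 40 1).map (fun r => if (r, e r) = x then (1:Int) else 0)).sum
      = if x.2 = e x.1 then 1 else 0 := by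
  rw [PySem.List.pyRange_one_append 0 x.1 40 h0 h40.le,
      PySem.List.pyRange_one_cons h40]
  rw [List.map_append, List.sum_append, List.map_cons, List.sum_cons]
  rw [pv_sum_zero e x _ (fun r hr => by
        have := PySem.List.mem_pyRange_one.mp hr; omega)]
  rw [pv_sum_zero e x _ (fun r hr => by
        have := PySem.List.mem_pyRange_one.mp hr; omega)]
  have hx : ((x.1, e x.1) = x) ↔ (x.2 = e x.1) := by
    constructor
    · intro h; rw [← h]
    · intro h; exact Prod.ext rfl h.symm
  simp [hx]

theorem pv_sum_count (e : Int → Int) : ∀ (ks : List (Int × Int)),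
    (∀ k ∈ ks, 0 ≤ k.1 ∧ k.1 < 40) →
    ((PySem.List.pyRange 0 40 1).map (fun r => ((ks.count (r, e r) : Nat) : Int))).sum
      = ((ks.countP (fun k => k.2 == e k.1) : Nat) : Int) := by
  intro ks
  induction ks with
  | nil => intro _; simp
  | cons x t ih =>
    intro h
    have hx := h x (by simp)
    have step : (fun r => (((x :: t).count (r, e r) : Nat) : Int))
        = fun r => ((t.count (r, e r) : Nat) : Int) + (if (r, e r) = x then (1:Int) else 0) := by
      funext r
      rw [List.count_cons]
      by_cases hc : (r, e r) = x
      · simp [hc]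
      · have hc2 : ¬(x = (r, e r)) := fun h2 => hc h2.symm
        simp [hc, hc2]
    rw [step, PySem.List.sum_map_add_int, ih (fun k hk => h k (by simp [hk])),
        pv_sum_ind e x hx.1 hx.2, List.countP_cons]
    by_cases hc : x.2 = e x.1 <;> simp [hc]

theorem pvCnt_getD (answers : List Int) (k : Int × Int) :
    (pvCnt answers).getD k 0
      = (((PySem.List.enumerate answers 0).map
            (fun ia => (PySem.Int.mod ia.1 40, ia.2))).count k : Int) := by
  have h : pvCnt answers
      = ((PySem.List.enumerate answers 0).map
            (fun ia => (PySem.Int.mod ia.1 40, ia.2))).foldl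
          (fun d x => d.insert x (d.getD x 0 + 1)) PySem.Dict.empty := by
    unfold pvCnt; rw [List.foldl_map]
  rw [h, PySem.Dict.getD_foldl_insert_add_one]
  simp [PySem.Dict.getD_empty]

theorem pv_component (answers p : List Int) (hm : 0 < (p.length : Int))
    (hd : (p.length : Int) ∣ 40) :
    (PySem.List.pyRange 0 ((answers.length : Int)) 1).foldl
      (fun s i => if PySem.List.pyGetD p (PySem.Int.mod i (p.length : Int)) 0
                      = PySem.List.pyGetD answers i 0 then s + 1 else s) 0
    = pvScore (pvCnt answers) p := by
  rw [PySem.List.foldl_ite_add_one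
      (fun i : Int => PySem.List.pyGetD p (PySem.Int.mod i (p.length : Int)) 0
                        = PySem.List.pyGetD answers i 0)]
  unfold pvScore
  rw [pv_foldl_add]
  have hmem : ∀ k ∈ (PySem.List.enumerate answers 0).map
      (fun ia => (PySem.Int.mod ia.1 40, ia.2)), 0 ≤ k.1 ∧ k.1 < 40 := by
    intro k hk
    rcases List.mem_map.mp hk with ⟨ia, _, rfl⟩
    exact pv_mod40_bounds ia.1
  have hsum := pv_sum_count
    (fun r => PySem.List.pyGetD p (PySem.Int.mod r (p.length : Int)) 0)
    ((PySem.List.enumerate answers 0).map (fun ia => (PySem.Int.mod ia.1 40, ia.2))) hmem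
  simp only [pvCnt_getD]
  rw [hsum, List.countP_map, PySem.List.enumerate_eq_map_pyRange (d := 0), List.countP_map]
  simp only [PySem.List.len_eq, zero_add]
  congr 1
  apply List.countP_congr
  intro j _
  simp only [Function.comp]
  rw [pv_mod_mod (p.length : Int) hm hd j]
  by_cases h : PySem.List.pyGetD p (PySem.Int.mod j (p.length : Int)) 0
      = PySem.List.pyGetD answers j 0
  · simp [h]
  · have h2 : ¬(PySem.List.pyGetD answers j 0
        = PySem.List.pyGetD p (PySem.Int.mod j (p.length : Int)) 0) := fun h3 => h h3.symm
    simp [h, h2]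

theorem pv_foldl_prod3 (c1 c2 c3 : Int → Prop) [DecidablePred c1] [DecidablePred c2]
    [DecidablePred c3] :
    ∀ (L : List Int) (a b c : Int),
      L.foldl (fun s i =>
          ((if c1 i then s.1 + 1 else s.1),
           (if c2 i then s.2.1 + 1 else s.2.1),
           (if c3 i then s.2.2 + 1 else s.2.2))) (a, b, c)
        = (L.foldl (fun s i => if c1 i then s + 1 else s) a,
           L.foldl (fun s i => if c2 i then s + 1 else s) b,
           L.foldl (fun s i => if c3 i then s + 1 else s) c) := by
  intro L
  induction L with
  | nil => intro a b c; rfl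
  | cons x t ih => intro a b c; simp only [List.foldl]; rw [ih]

theorem pv_main (answers : List Int) : solution answers = solution_alt answers := by
  simp only [solution, solution_alt]
  rw [pv_foldl_prod3]
  rw [pv_component answers [1, 2, 3, 4, 5] (by norm_num) (by norm_num),
      pv_component answers [2, 1, 2, 3, 2, 4, 2, 5] (by norm_num) (by norm_num),
      pv_component answers [3, 3, 1, 1, 2, 2, 4, 4, 5, 5] (by norm_num) (by norm_num)]
  simp [PySem.List.max?_id_cons, List.foldl, max_assoc]

-- ===== VERDICT =====
theorem solution_spec : Claim_equal_solution := by
  intro answers _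
  unfold Spec_solution
  exact pv_main answers
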